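-- pv_equiv track=rewrite | github.com/sshmatrix/indexit | backend/src/rarity.py | gaussianPrime
-- ===== SOURCE A (Python) =====
-- def gaussianPrime(num): #16
--     flag = False
--     counter = 0
--     while flag == False and 4*counter + 3 <= num:
--         if 4*counter + 3 == num:
--             flag = True
--             break
--         counter += 1
--     return(flag)
-- ===== SOURCE B (Python) =====
-- def gaussianPrime(num):
--     # O(1): numbers of the form 4k+3 with k >= 0 are exactly num >= 3 with num % 4 == 3
--     return num >= 3 and num % 4 == 3
-- ===== Notes on version B (the rewrite author's own statement) =====
-- stated objective: faster
-- what changed: replaced the linear search over counters k with the closed-form arithmetic test num >= 3 and num % 4 == 3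
import Mathlib
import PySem

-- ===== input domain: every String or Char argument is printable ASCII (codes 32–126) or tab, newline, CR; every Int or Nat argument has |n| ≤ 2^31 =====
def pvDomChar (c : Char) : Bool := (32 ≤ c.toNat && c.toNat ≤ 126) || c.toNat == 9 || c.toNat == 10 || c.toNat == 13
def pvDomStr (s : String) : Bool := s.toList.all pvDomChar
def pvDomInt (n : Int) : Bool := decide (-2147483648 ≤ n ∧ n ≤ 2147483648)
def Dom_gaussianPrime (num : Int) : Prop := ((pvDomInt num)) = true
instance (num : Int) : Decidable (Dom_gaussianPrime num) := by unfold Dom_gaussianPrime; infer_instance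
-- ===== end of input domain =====

-- B replaces A's linear search over counters with a closed-form arithmetic test (objective: faster).

-- ===== PORT A =====
-- A's while loop: runs while 4*counter+3 <= num, returns true on hitting 4*counter+3 == num.
def gpLoop (num counter : Int) : Bool :=
  if _h : 4 * counter + 3 ≤ num then
    if 4 * counter + 3 = num then true
    else gpLoop num (counter + 1)
  else false
termination_by (num - (4 * counter + 3)).toNat
decreasing_by omega

def gaussianPrime (num : Int) : Bool := gpLoop num 0

-- ===== PORT B =====
def gaussianPrime_alt (num : Int) : Bool :=
  decide (3 ≤ num) && decide (PySem.Int.mod num 4 = 3)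

-- ===== PRECONDITION & SPEC =====
def Spec_gaussianPrime (num : Int) (out : Bool) : Prop := out = gaussianPrime_alt num
instance (num : Int) (out : Bool) : Decidable (Spec_gaussianPrime num out) := by unfold Spec_gaussianPrime; infer_instance

-- ===== CLAIM (what is proved, stated in full; the proofs are below) =====
def Claim_equal_gaussianPrime : Prop := ∀ (num : Int), Dom_gaussianPrime num → Spec_gaussianPrime num (gaussianPrime num)

-- ===== LEMMAS AND PROOFS =====
-- Loop characterisation: the search from 'counter' succeeds iff num is reachable, i.e.
-- 4*counter+3 ≤ num and num ≡ 3 (mod 4).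
theorem gpLoop_eq (num counter : Int) :
    gpLoop num counter = decide (4 * counter + 3 ≤ num ∧ num % 4 = 3) := by
  fun_induction gpLoop num counter with
  | case1 counter h heq => simp; omega
  | case2 counter h heq ih => rw [ih]; simp only [decide_eq_decide]; constructor <;> intro ⟨h1,h2⟩ <;> exact ⟨by omega, h2⟩
  | case3 counter h => simp; omega

-- ===== VERDICT (by name: the statement is the Claim_ definition above) =====
theorem gaussianPrime_spec : Claim_equal_gaussianPrime := by
  intro num _
  unfold Spec_gaussianPrime gaussianPrime gaussianPrime_alt
  rw [gpLoop_eq, PySem.Int.mod_eq_emod_of_pos (a := num) (b := 4) (by omega)]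
  simp
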